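-- pv_equiv track=rewrite | github.com/kakao-harry-kr2/Algorithms | 05-May/20220509/baekjoon1280.py | search
-- ===== SOURCE A (Python) =====
-- BIG_NUMBER = 10 ** 9 + 7
--
-- def search(tree, node, start, end, left, right):
--     if left > end or right < start:
--         return 0, 0
--
--     if left <= start and end <= right:
--         return tree[node]
--
--     cnt1, sum1 = search(tree, 2*node, start, (start+end)//2, left, right)
--     cnt2, sum2 = search(tree, 2*node+1, (start+end)//2+1, end, left, right)
--
--     return cnt1 + cnt2, (sum1 + sum2) % BIG_NUMBER
-- ===== SOURCE B (Python) =====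
-- BIG_NUMBER = 10 ** 9 + 7
--
-- def search(tree, node, start, end, left, right):
--     # Iterative work-list traversal; the modulus is applied once at the end
--     # (valid: A takes it after every combine, which is congruent mod BIG_NUMBER).
--     if left > end or right < start:
--         return 0, 0
--     if left <= start and end <= right:
--         return tree[node]
--     total_cnt = 0
--     total_sum = 0
--     stack = [(node, start, end)]
--     while stack:
--         n, s, e = stack.pop()
--         if left > e or right < s:
--             continue
--         if left <= s and e <= right:
--             c, sm = tree[n]
--             total_cnt += c
--             total_sum += sm
--             continue
--         m = (s + e) // 2
--         stack.append((2 * n + 1, m + 1, e))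
--         stack.append((2 * n, s, m))
--     return total_cnt, total_sum % BIG_NUMBER
-- ===== Notes on version B (the rewrite author's own statement) =====
-- stated objective: alternative
-- what changed: The recursive divide-and-combine (which takes a modulus after every combine) is replaced by an iterative explicit-stack work-list traversal that accumulates count and sum in two running totals and applies the modulus once at the end; only the top-level disjoint/contained cases return directly, matching A's unmodded return there.
-- outside the precondition, e.g. on search([(0, 0), (1, 1), (2, 2)], 1, 0, 1, 0, 0): A returns (2, 2), B returns (2, 2); on search([(1, 1), (2, 2)], 0, 0, 1, 0, 0): A returns (1, 1), B returns (1, 1)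
import Mathlib
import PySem

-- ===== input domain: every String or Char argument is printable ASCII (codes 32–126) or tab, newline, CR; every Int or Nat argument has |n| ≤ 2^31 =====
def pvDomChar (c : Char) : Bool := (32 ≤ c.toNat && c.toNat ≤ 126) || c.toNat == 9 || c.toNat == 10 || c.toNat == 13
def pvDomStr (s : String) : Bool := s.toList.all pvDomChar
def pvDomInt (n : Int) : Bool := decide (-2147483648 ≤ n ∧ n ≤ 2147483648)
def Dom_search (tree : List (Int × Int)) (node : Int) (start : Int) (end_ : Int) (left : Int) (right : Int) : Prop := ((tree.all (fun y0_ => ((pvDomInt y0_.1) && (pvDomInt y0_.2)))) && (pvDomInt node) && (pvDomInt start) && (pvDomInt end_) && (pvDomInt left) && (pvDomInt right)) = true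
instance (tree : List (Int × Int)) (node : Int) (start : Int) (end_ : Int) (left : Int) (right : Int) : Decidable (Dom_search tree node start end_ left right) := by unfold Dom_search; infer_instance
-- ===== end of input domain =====

-- B replaces A's recursion by an iterative explicit-stack work-list with running
-- count/sum accumulators and a single final modulus (alternative decomposition, same cost).


-- termination lemmas for the recursions (cited by name in decreasing_by)
theorem pvLoopDecNat (a b c k : Nat) (h : a + b + 1 = c) :
    2 * a + 1 + (2 * b + 1 + k) < 2 * c + 1 + k := by omega

theorem pvDropDec (m k : Nat) : k < m + 1 + k := by omega

theorem pvMidFacts (s e l r : Int) (h1 : ¬(l > e ∨ r < s)) (h2 : ¬(l ≤ s ∧ e ≤ r)) :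
    s < e ∧ s ≤ PySem.Int.floordiv (s + e) 2 ∧ PySem.Int.floordiv (s + e) 2 < e := by
  have hse : s < e := by
    rcases not_and_or.mp h2 with hc | hc
    · exact lt_of_lt_of_le (not_le.mp hc) (not_lt.mp (not_or.mp h1).1)
    · exact lt_of_le_of_lt (not_lt.mp (not_or.mp h1).2) (not_le.mp hc)
  refine ⟨hse, ?_, ?_⟩
  · rw [PySem.Int.le_floordiv_iff_mul_le (by norm_num)]
    linarith
  · rw [PySem.Int.floordiv_lt_iff_lt_mul (by norm_num)]
    linarith

theorem pvMidDec (s e l r : Int) (h1 : ¬(l > e ∨ r < s)) (h2 : ¬(l ≤ s ∧ e ≤ r)) :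
    (PySem.Int.floordiv (s + e) 2 - s).toNat < (e - s).toNat ∧
    (e - (PySem.Int.floordiv (s + e) 2 + 1)).toNat < (e - s).toNat := by
  obtain ⟨hse, hlo, hhi⟩ := pvMidFacts s e l r h1 h2
  refine ⟨?_, ?_⟩
  · exact (Int.toNat_lt_toNat (sub_pos.mpr hse)).mpr (sub_lt_sub_right hhi s)
  · exact (Int.toNat_lt_toNat (sub_pos.mpr hse)).mpr (sub_lt_sub_left (Int.lt_add_one_iff.mpr hlo) e)

theorem pvToNatSum (x y z : Int) (hx : 0 ≤ x) (hy : 0 ≤ y) (h : x + y + 1 = z) :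
    x.toNat + y.toNat + 1 = z.toNat := by
  calc x.toNat + y.toNat + 1 = (x + y).toNat + (1:Int).toNat := by rw [Int.toNat_add hx hy]; rfl
    _ = (x + y + 1).toNat := (Int.toNat_add (add_nonneg hx hy) zero_le_one).symm
    _ = z.toNat := by rw [h]

theorem pvLoopDec (s e l r : Int) (k : Nat) (h1 : ¬(l > e ∨ r < s)) (h2 : ¬(l ≤ s ∧ e ≤ r)) :
    2 * (PySem.Int.floordiv (s + e) 2 - s).toNat + 1 +
      (2 * (e - (PySem.Int.floordiv (s + e) 2 + 1)).toNat + 1 + k) < 2 * (e - s).toNat + 1 + k := by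
  obtain ⟨hse, hlo, hhi⟩ := pvMidFacts s e l r h1 h2
  exact pvLoopDecNat _ _ _ k
    (pvToNatSum _ _ _ (sub_nonneg.mpr hlo) (sub_nonneg.mpr (Int.add_one_le_iff.mpr hhi)) (by ring))

-- ===== PORT A =====
def search (tree : List (Int × Int)) (node : Int) (start : Int) (end_ : Int) (left : Int) (right : Int) : Int × Int :=
  if left > end_ ∨ right < start then (0, 0)
  else if left ≤ start ∧ end_ ≤ right then PySem.List.pyGetD tree node (0, 0)
  else
    let p1 := search tree (2 * node) start (PySem.Int.floordiv (start + end_) 2) left right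
    let p2 := search tree (2 * node + 1) (PySem.Int.floordiv (start + end_) 2 + 1) end_ left right
    (p1.1 + p2.1, PySem.Int.mod (p1.2 + p2.2) 1000000007)
termination_by (end_ - start).toNat
decreasing_by
  · exact (pvMidDec _ _ _ _ ‹_› ‹_›).1
  · exact (pvMidDec _ _ _ _ ‹_› ‹_›).2

-- ===== PORT B =====
-- the while-loop over the explicit stack of (node, start, end) frames
def searchLoop (tree : List (Int × Int)) (left : Int) (right : Int) (stack : List (Int × Int × Int)) (cnt : Int) (acc : Int) : Int × Int :=
  match stack with
  | [] => (cnt, PySem.Int.mod acc 1000000007)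
  | (n, s, e) :: rest =>
    if left > e ∨ right < s then searchLoop tree left right rest cnt acc
    else if left ≤ s ∧ e ≤ right then
      searchLoop tree left right rest (cnt + (PySem.List.pyGetD tree n (0, 0)).1) (acc + (PySem.List.pyGetD tree n (0, 0)).2)
    else
      searchLoop tree left right
        ((2 * n, s, PySem.Int.floordiv (s + e) 2) :: (2 * n + 1, PySem.Int.floordiv (s + e) 2 + 1, e) :: rest) cnt acc
termination_by (stack.map fun f => 2 * (f.2.2 - f.2.1).toNat + 1).sum
decreasing_by
  all_goals simp only [List.map_cons, List.sum_cons]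
  · exact pvDropDec _ _
  · exact pvDropDec _ _
  · exact pvLoopDec _ _ _ _ _ ‹_› ‹_›

def search_alt (tree : List (Int × Int)) (node : Int) (start : Int) (end_ : Int) (left : Int) (right : Int) : Int × Int :=
  if left > end_ ∨ right < start then (0, 0)
  else if left ≤ start ∧ end_ ≤ right then PySem.List.pyGetD tree node (0, 0)
  else searchLoop tree left right [(node, start, end_)] 0 0

-- ===== PRECONDITION & SPEC =====
-- Python's tree[n] raises IndexError when an accessed index falls outside the array, and the
-- set of indices a partial-overlap query touches has no closed form; Pre_ therefore admits
-- disjoint queries, contained queries with a Python-valid index, and partial-overlap queries on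
-- the data structure's natural domain — a root index ≥ 1 whose complete subtree down to the
-- leaves of [start,end_] fits in the array (the standard segment-tree array shape, which keeps
-- every accessed index in range); ragged or non-positively rooted arrays on which A's traversal
-- happens to stay in range and return are excluded (B returns A's exact value there too).
def Pre_search (tree : List (Int × Int)) (node : Int) (start : Int) (end_ : Int) (left : Int) (right : Int) : Prop :=
  left > end_ ∨ right < start
  ∨ (left ≤ start ∧ end_ ≤ right ∧ PySem.Raise.InRange tree.length node)
  ∨ (1 ≤ node ∧ (node + 1) * 2 ^ (Nat.clog 2 ((end_ - start).toNat + 1)) ≤ (tree.length : Int))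
instance (tree : List (Int × Int)) (node : Int) (start : Int) (end_ : Int) (left : Int) (right : Int) : Decidable (Pre_search tree node start end_ left right) := by unfold Pre_search; infer_instance

def pvWitness_search : (List (Int × Int)) × Int × Int × Int × Int × Int := ([(3, 10)], 0, 0, 0, 0, 0)

def Spec_search (tree : List (Int × Int)) (node : Int) (start : Int) (end_ : Int) (left : Int) (right : Int) (out : Int × Int) : Prop := out = search_alt tree node start end_ left right
instance (tree : List (Int × Int)) (node : Int) (start : Int) (end_ : Int) (left : Int) (right : Int) (out : Int × Int) : Decidable (Spec_search tree node start end_ left right out) := by unfold Spec_search; infer_instance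

-- ===== CLAIM (what is proved, stated in full; the proofs are below) =====
def Claim_equal_search : Prop := ∀ (tree : List (Int × Int)) (node : Int) (start : Int) (end_ : Int) (left : Int) (right : Int), Dom_search tree node start end_ left right → Pre_search tree node start end_ left right → Spec_search tree node start end_ left right (search tree node start end_ left right)

-- ===== LEMMAS AND PROOFS =====

-- unmodded divide-and-combine reference value (proof helper only)
def rawSearch (tree : List (Int × Int)) (node : Int) (start : Int) (end_ : Int) (left : Int) (right : Int) : Int × Int :=
  if left > end_ ∨ right < start then (0, 0)
  else if left ≤ start ∧ end_ ≤ right then PySem.List.pyGetD tree node (0, 0)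
  else
    let p1 := rawSearch tree (2 * node) start (PySem.Int.floordiv (start + end_) 2) left right
    let p2 := rawSearch tree (2 * node + 1) (PySem.Int.floordiv (start + end_) 2 + 1) end_ left right
    (p1.1 + p2.1, p1.2 + p2.2)
termination_by (end_ - start).toNat
decreasing_by
  · exact (pvMidDec _ _ _ _ ‹_› ‹_›).1
  · exact (pvMidDec _ _ _ _ ‹_› ‹_›).2

theorem modM (x : Int) : PySem.Int.mod x 1000000007 = x % 1000000007 :=
  PySem.Int.mod_eq_emod_of_pos (by norm_num)

theorem search_raw (tree : List (Int × Int)) (node start end_ left right : Int) :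
    (search tree node start end_ left right).1 = (rawSearch tree node start end_ left right).1 ∧
    (search tree node start end_ left right).2 % 1000000007 = (rawSearch tree node start end_ left right).2 % 1000000007 := by
  fun_induction search tree node start end_ left right
  · rename_i n0 s0 e0 h
    rw [rawSearch.eq_def, if_pos h]
    exact ⟨rfl, rfl⟩
  · rename_i n0 s0 e0 h1 h2
    rw [rawSearch.eq_def, if_neg h1, if_pos h2]
    exact ⟨rfl, rfl⟩
  · rename_i n0 s0 e0 h1 h2 p1 p2 ihA ihB
    rw [rawSearch.eq_def, if_neg h1, if_neg h2]
    dsimp only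
    simp only [p1, p2]
    rw [modM]
    obtain ⟨e1, m1⟩ := ihA
    obtain ⟨e2, m2⟩ := ihB
    exact ⟨by omega, by omega⟩

theorem searchLoop_raw (tree : List (Int × Int)) (left right : Int) (stack : List (Int × Int × Int)) (cnt acc : Int) :
    searchLoop tree left right stack cnt acc =
      (cnt + (stack.map fun f => (rawSearch tree f.1 f.2.1 f.2.2 left right).1).sum,
       PySem.Int.mod (acc + (stack.map fun f => (rawSearch tree f.1 f.2.1 f.2.2 left right).2).sum) 1000000007) := by
  fun_induction searchLoop tree left right stack cnt acc
  · simp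
  · rename_i n s e rest cnt0 acc0 h ih
    rw [ih]
    simp only [List.map_cons, List.sum_cons]
    rw [rawSearch.eq_def, if_pos h]
    simp only [Prod.mk.injEq, modM]
    exact ⟨by omega, by omega⟩
  · rename_i n s e rest cnt0 acc0 h1 h2 ih
    rw [ih]
    simp only [List.map_cons, List.sum_cons]
    rw [rawSearch.eq_def, if_neg h1, if_pos h2]
    simp only [Prod.mk.injEq, modM]
    exact ⟨by omega, by omega⟩
  · rename_i n s e rest cnt0 acc0 h1 h2 ih
    rw [ih]
    simp only [List.map_cons, List.sum_cons]
    conv_rhs => rw [rawSearch.eq_def]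
    rw [if_neg h1, if_neg h2]
    dsimp only
    simp only [Prod.mk.injEq, modM]
    exact ⟨by omega, by omega⟩

-- ===== VERDICT (by name: the statement is the Claim_ definition above) =====
theorem search_spec : Claim_equal_search := by
  intro tree node start end_ left right _ _
  unfold Spec_search search_alt
  rw [search]
  by_cases h1 : left > end_ ∨ right < start
  · rw [if_pos h1, if_pos h1]
  · by_cases h2 : left ≤ start ∧ end_ ≤ right
    · rw [if_neg h1, if_pos h2, if_neg h1, if_pos h2]
    · rw [if_neg h1, if_neg h2, if_neg h1, if_neg h2]
      rw [searchLoop_raw]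
      simp only [List.map_cons, List.map_nil, List.sum_cons, List.sum_nil]
      conv_rhs => rw [rawSearch.eq_def]
      rw [if_neg h1, if_neg h2]
      obtain ⟨e1, m1⟩ := search_raw tree (2 * node) start (PySem.Int.floordiv (start + end_) 2) left right
      obtain ⟨e2, m2⟩ := search_raw tree (2 * node + 1) (PySem.Int.floordiv (start + end_) 2 + 1) end_ left right
      dsimp only
      simp only [Prod.mk.injEq, modM]
      exact ⟨by omega, by omega⟩
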